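-- pv_equiv track=rewrite | github.com/kabishsridar/codewars | problem_78.py | rev_sub
-- ===== SOURCE A (Python) =====
-- def rev_sub(arr):
--     result = []
--     even_num = []
--
--     for num in arr:
--         if num % 2 == 0:
--             even_num.append(num)
--         else:
--             if even_num:
--                 result.extend(even_num[::-1])
--                 even_num = []
--             result.append(num)
--     if even_num:
--         result.extend(even_num[::-1])
--     return result
-- ===== SOURCE B (Python) =====
-- def rev_sub(arr):
--     # run-splitter: peel off each maximal same-parity run; reverse it if even
--     out = []
--     i = 0
--     n = len(arr)
--     while i < n:
--         k = arr[i] % 2 == 0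
--         j = i + 1
--         while j < n and (arr[j] % 2 == 0) == k:
--             j += 1
--         run = arr[i:j]
--         out += run[::-1] if k else run
--         i = j
--     return out
-- ===== Notes on version B (the rewrite author's own statement) =====
-- stated objective: alternative
-- what changed: Replaces A's flush-buffer state machine (accumulate evens, flush reversed at each odd element and at the end) with a recursive run-splitter that peels off each maximal same-parity run and reverses it if even.
import Mathlib
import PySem

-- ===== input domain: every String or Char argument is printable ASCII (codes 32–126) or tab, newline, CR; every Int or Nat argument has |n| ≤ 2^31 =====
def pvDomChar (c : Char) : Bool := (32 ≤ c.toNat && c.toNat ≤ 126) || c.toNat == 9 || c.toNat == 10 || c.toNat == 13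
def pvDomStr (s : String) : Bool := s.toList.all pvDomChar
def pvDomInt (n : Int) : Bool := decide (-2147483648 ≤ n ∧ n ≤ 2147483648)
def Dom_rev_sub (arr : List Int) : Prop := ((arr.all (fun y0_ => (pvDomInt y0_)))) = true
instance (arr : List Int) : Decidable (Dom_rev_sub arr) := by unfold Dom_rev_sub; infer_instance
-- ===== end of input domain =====

-- B replaces A's flush-buffer state machine with a recursive run-splitter (alternative decomposition, same cost).

-- ===== PORT A =====
-- A's loop: state (result, even_num); evens are buffered, flushed reversed at each odd element and at the end.
def revSubGo : List Int → List Int → List Int → List Int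
  | [], res, ev => if ev ≠ [] then res ++ ev.reverse else res
  | n :: rest, res, ev =>
    if PySem.Int.mod n 2 == 0 then
      revSubGo rest res (ev ++ [n])
    else
      revSubGo rest ((if ev ≠ [] then res ++ ev.reverse else res) ++ [n]) []

def rev_sub (arr : List Int) : List Int := revSubGo arr [] []

-- ===== PORT B =====
-- B: peel off the maximal run with the first element's parity, reverse it if even, recurse on the rest.
def rev_sub_alt : List Int → List Int
  | [] => []
  | n :: rest =>
    let k := PySem.Int.mod n 2 == 0
    let run := n :: rest.takeWhile (fun m => (PySem.Int.mod m 2 == 0) == k)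
    (if k then run.reverse else run) ++
      rev_sub_alt (rest.dropWhile (fun m => (PySem.Int.mod m 2 == 0) == k))
  termination_by arr => arr.length
  decreasing_by
    simpa using Nat.lt_succ_of_le (List.length_dropWhile_le _ _)

-- ===== PRECONDITION & SPEC =====
def Spec_rev_sub (arr : List Int) (out : List Int) : Prop := out = rev_sub_alt arr
instance (arr : List Int) (out : List Int) : Decidable (Spec_rev_sub arr out) := by unfold Spec_rev_sub; infer_instance

-- ===== CLAIM (what is proved, stated in full; the proofs are below) =====
def Claim_equal_rev_sub : Prop := ∀ (arr : List Int), Dom_rev_sub arr → Spec_rev_sub arr (rev_sub arr)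

-- ===== LEMMAS AND PROOFS =====

-- even predicate (abstract handle for the parity test, never unfolded)
def pvEven (m : Int) : Bool := PySem.Int.mod m 2 == 0

theorem pvEven_eq (m : Int) : (PySem.Int.mod m 2 == 0) = pvEven m := rfl

-- splitting off a (possibly empty) even prefix commutes with rev_sub_alt, reversed
theorem alt_even_split (xs : List Int) :
    rev_sub_alt xs = (xs.takeWhile pvEven).reverse ++ rev_sub_alt (xs.dropWhile pvEven) := by
  cases xs with
  | nil => simp [rev_sub_alt]
  | cons n t =>
    by_cases h : pvEven n = true
    · conv_lhs => rw [rev_sub_alt]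
      simp only [pvEven_eq, h, beq_true, if_true]
      simp [h]
    · have h' : pvEven n = false := Bool.eq_false_iff.mpr h
      simp [h']

-- an odd prefix passes straight through rev_sub_alt
theorem alt_odd_split (t : List Int) :
    t.takeWhile (fun m => !pvEven m) ++ rev_sub_alt (t.dropWhile (fun m => !pvEven m))
      = rev_sub_alt t := by
  cases t with
  | nil => simp [rev_sub_alt]
  | cons m t =>
    by_cases hm : pvEven m = true
    · simp [hm]
    · have hm' : pvEven m = false := Bool.eq_false_iff.mpr hm
      simp only [List.takeWhile_cons, List.dropWhile_cons, hm', Bool.not_false, if_true,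
        List.cons_append]
      conv_rhs => rw [rev_sub_alt]
      simp only [pvEven_eq, hm', beq_false, Bool.false_eq_true, if_false, List.cons_append]

-- an odd head passes straight through rev_sub_alt
theorem alt_odd_cons (n : Int) (rest : List Int) (h : pvEven n = false) :
    rev_sub_alt (n :: rest) = n :: rev_sub_alt rest := by
  conv_lhs => rw [rev_sub_alt]
  simp only [pvEven_eq, h, beq_false, Bool.false_eq_true, if_false, List.cons_append]
  rw [alt_odd_split]

-- loop invariant for A's accumulator pair
theorem revSubGo_eq (arr : List Int) : ∀ res ev : List Int,
    revSubGo arr res ev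
      = res ++ ((arr.takeWhile pvEven).reverse ++ ev.reverse)
          ++ rev_sub_alt (arr.dropWhile pvEven) := by
  induction arr with
  | nil =>
    intro res ev
    cases ev <;> simp [revSubGo, rev_sub_alt]
  | cons n rest ih =>
    intro res ev
    by_cases h : (PySem.Int.mod n 2 == 0) = true
    · have h' : pvEven n = true := h
      rw [revSubGo, if_pos h, ih]
      simp [h', List.append_assoc]
    · have h' : pvEven n = false := Bool.eq_false_iff.mpr h
      have hres : (if ev ≠ [] then res ++ ev.reverse else res) = res ++ ev.reverse := by
        cases ev <;> simp
      rw [revSubGo, if_neg h, ih, hres]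
      simp only [List.takeWhile_cons, List.dropWhile_cons, h', Bool.false_eq_true, if_false]
      rw [alt_odd_cons n rest h', alt_even_split rest]
      simp [List.append_assoc]

-- ===== VERDICT (by name: the statement is the Claim_ definition above) =====
theorem rev_sub_spec : Claim_equal_rev_sub := by
  intro arr _
  unfold Spec_rev_sub rev_sub
  rw [revSubGo_eq, alt_even_split arr]
  simp
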